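-- pv_equiv track=rewrite | github.com/tiaggohh/Programacion_Thiago_Custiriano | Ejercicios/Arrays Bidimensionales/Desafios/Desafio 3 (Secuencias).py | encontrar_secuencias_pares
-- ===== SOURCE A (Python) =====
-- def encontrar_secuencias_pares(fila):
--     secuencias = []
--     secuencia = []
--     for num in fila:
--         if num % 2 == 0:
--             secuencia.append(num)
--         else:
--             if len(secuencia) >= 2:
--                 secuencias.append(secuencia)
--             secuencia = []
--     if len(secuencia) >= 2:
--         secuencias.append(secuencia)
--     return secuencias
-- ===== SOURCE B (Python) =====
-- def encontrar_secuencias_pares(fila):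
--     # group into maximal runs of evens, keep runs of length >= 2
--     resultado = []
--     i, n = 0, len(fila)
--     while i < n:
--         if fila[i] % 2 == 0:
--             j = i + 1
--             while j < n and fila[j] % 2 == 0:
--                 j += 1
--             if j - i >= 2:
--                 resultado.append(fila[i:j])
--             i = j
--         else:
--             i += 1
--     return resultado
-- ===== Notes on version B (the rewrite author's own statement) =====
-- stated objective: alternative
-- what changed: B extracts each maximal run of consecutive evens as a whole (group-then-filter by length >= 2) instead of A's element-by-element accumulator that appends on even and flushes on odd.
import Mathlib
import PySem

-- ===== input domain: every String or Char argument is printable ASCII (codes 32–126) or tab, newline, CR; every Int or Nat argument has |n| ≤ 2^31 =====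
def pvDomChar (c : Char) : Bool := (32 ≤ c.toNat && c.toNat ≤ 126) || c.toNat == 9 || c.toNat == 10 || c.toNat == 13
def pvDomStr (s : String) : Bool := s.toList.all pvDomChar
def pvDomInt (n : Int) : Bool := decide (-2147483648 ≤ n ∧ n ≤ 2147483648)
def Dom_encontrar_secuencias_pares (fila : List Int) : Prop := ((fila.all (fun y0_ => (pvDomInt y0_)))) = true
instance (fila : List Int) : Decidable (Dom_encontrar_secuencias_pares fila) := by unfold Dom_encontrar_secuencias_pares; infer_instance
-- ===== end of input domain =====

-- B groups the row into maximal runs of consecutive evens and keeps those of length ≥ 2,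
-- instead of A's append-on-even / flush-on-odd accumulator. Alternative decomposition; same cost.

-- ===== PORT A =====
-- state = (secuencias, secuencia)
def pvAStep (st : List (List Int) × List Int) (num : Int) : List (List Int) × List Int :=
  if num % 2 == 0 then (st.1, st.2 ++ [num])
  else (if 2 ≤ st.2.length then st.1 ++ [st.2] else st.1, [])

def encontrar_secuencias_pares (fila : List Int) : List (List Int) :=
  let st := fila.foldl pvAStep ([], [])
  if 2 ≤ st.2.length then st.1 ++ [st.2] else st.1

-- ===== PORT B =====
-- at an even head, take the whole maximal even run (Source B's inner while collecting fila[i:j]),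
-- keep it if its length ≥ 2, and continue after it; at an odd head, skip it
def encontrar_secuencias_pares_alt (fila : List Int) : List (List Int) :=
  match fila with
  | [] => []
  | x :: xs =>
    if x % 2 == 0 then
      (if 2 ≤ ((x :: xs).takeWhile (fun y => y % 2 == 0)).length then
        [(x :: xs).takeWhile (fun y => y % 2 == 0)] else []) ++
      encontrar_secuencias_pares_alt ((x :: xs).dropWhile (fun y => y % 2 == 0))
    else
      encontrar_secuencias_pares_alt xs
  termination_by fila.length
  decreasing_by
  · simp only [List.dropWhile]
    rename_i h
    simp only [h]
    exact Nat.lt_succ_of_le (List.length_dropWhile_le _ _)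
  · simp

-- ===== PRECONDITION & SPEC =====
def Spec_encontrar_secuencias_pares (fila : List Int) (out : List (List Int)) : Prop := out = encontrar_secuencias_pares_alt fila
instance (fila : List Int) (out : List (List Int)) : Decidable (Spec_encontrar_secuencias_pares fila out) := by unfold Spec_encontrar_secuencias_pares; infer_instance

-- ===== CLAIM (what is proved, stated in full; the proofs are below) =====
def Claim_equal_encontrar_secuencias_pares : Prop := ∀ (fila : List Int), Dom_encontrar_secuencias_pares fila → Spec_encontrar_secuencias_pares fila (encontrar_secuencias_pares fila)

-- ===== LEMMAS AND PROOFS =====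

-- takeWhile/dropWhile over an all-true prefix followed by a failing element
theorem tw_prefix (p : Int → Bool) (l : List Int) (y : Int) (ys : List Int)
    (h : ∀ a ∈ l, p a = true) (hy : p y = false) :
    (l ++ y :: ys).takeWhile p = l := by
  induction l with
  | nil => simp [hy]
  | cons a as ih =>
    simp only [List.cons_append, List.takeWhile_cons, h a (by simp)]
    rw [ih (fun b hb => h b (by simp [hb]))]
    simp

theorem dw_prefix (p : Int → Bool) (l : List Int) (y : Int) (ys : List Int)
    (h : ∀ a ∈ l, p a = true) (hy : p y = false) :
    (l ++ y :: ys).dropWhile p = y :: ys := by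
  induction l with
  | nil => simp [hy]
  | cons a as ih =>
    simp only [List.cons_append, List.dropWhile_cons, h a (by simp)]
    exact ih (fun b hb => h b (by simp [hb]))

-- an all-even list forms a single run
theorem alt_all_even (sec : List Int) (h : ∀ a ∈ sec, (a % 2 == 0) = true) :
    encontrar_secuencias_pares_alt sec = if 2 ≤ sec.length then [sec] else [] := by
  match sec with
  | [] => simp [encontrar_secuencias_pares_alt]
  | x :: xs =>
    rw [encontrar_secuencias_pares_alt]
    have hx : (x % 2 == 0) = true := h x (by simp)
    have ht : (x :: xs).takeWhile (fun y => y % 2 == 0) = x :: xs :=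
      List.takeWhile_eq_self_iff.mpr h
    have hd : (x :: xs).dropWhile (fun y => y % 2 == 0) = [] :=
      List.dropWhile_eq_nil_iff.mpr h
    simp [hx, ht, hd, encontrar_secuencias_pares_alt]

-- splitting off an all-even prefix followed by an odd element
theorem alt_even_prefix_odd (sec : List Int) (y : Int) (ys : List Int)
    (h : ∀ a ∈ sec, (a % 2 == 0) = true) (hy : (y % 2 == 0) = false) :
    encontrar_secuencias_pares_alt (sec ++ y :: ys) =
      (if 2 ≤ sec.length then [sec] else []) ++ encontrar_secuencias_pares_alt ys := by
  match sec with
  | [] =>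
    rw [List.nil_append, encontrar_secuencias_pares_alt]
    simp [hy]
  | x :: xs =>
    have hx : (x % 2 == 0) = true := h x (by simp)
    rw [List.cons_append, encontrar_secuencias_pares_alt]
    rw [show x :: (xs ++ y :: ys) = (x :: xs) ++ y :: ys from rfl]
    rw [tw_prefix _ _ _ _ h hy, dw_prefix _ _ _ _ h hy]
    rw [encontrar_secuencias_pares_alt]
    simp [hx, hy]

-- main invariant for A's fold
theorem foldl_inv (l : List Int) : ∀ (secs : List (List Int)) (sec : List Int),
    (∀ a ∈ sec, (a % 2 == 0) = true) →
    (let st := l.foldl pvAStep (secs, sec);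
     if 2 ≤ st.2.length then st.1 ++ [st.2] else st.1) =
      secs ++ encontrar_secuencias_pares_alt (sec ++ l) := by
  induction l with
  | nil =>
    intro secs sec h
    simp only [List.foldl_nil, List.append_nil]
    rw [alt_all_even sec h]
    split <;> simp
  | cons y ys ih =>
    intro secs sec h
    simp only [List.foldl_cons, pvAStep]
    by_cases hy : (y % 2 == 0) = true
    · simp only [hy]
      have h' : ∀ a ∈ sec ++ [y], (a % 2 == 0) = true := by
        intro a ha
        rcases List.mem_append.mp ha with h1 | h1
        · exact h a h1
        · simp at h1; subst h1; exact hy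
      have := ih secs (sec ++ [y]) h'
      simpa [List.append_assoc] using this
    · have hyf : (y % 2 == 0) = false := by simpa using hy
      rw [if_neg hy]
      have := ih (if 2 ≤ sec.length then secs ++ [sec] else secs) [] (by simp)
      simp only [List.nil_append] at this
      rw [this, alt_even_prefix_odd sec y ys h hyf]
      split <;> simp

-- ===== VERDICT (by name: the statement is the Claim_ definition above) =====
theorem encontrar_secuencias_pares_spec : Claim_equal_encontrar_secuencias_pares := by
  intro fila _
  unfold Spec_encontrar_secuencias_pares encontrar_secuencias_pares
  have := foldl_inv fila [] [] (by simp)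
  simpa using this
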